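-- pv_equiv track=rewrite | github.com/HIP-infrastructure/BIDS_Manager | ins_bids_class.py | parse_filename_dervivatives
-- ===== SOURCE A (Python) =====
-- def parse_filename_dervivatives(mod_dict, file):
--     fname_pieces = file.split('_')
--     for word in fname_pieces:
--         w = word.split('-')
--         if len(w) == 2 and w[0] in mod_dict.keys():
--             mod_dict[w[0]] = w[1]
--     if 'modality' in mod_dict and not mod_dict['modality']:
--         mod_dict['modality'] = fname_pieces[-1]
--     return mod_dict
-- ===== SOURCE B (Python) =====
-- def parse_filename_dervivatives(mod_dict, file):
--     fname_pieces = file.split('_')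
--     pairs = [p for p in (word.split('-') for word in fname_pieces) if len(p) == 2]
--
--     def latest(key, dflt):
--         for k, v in reversed(pairs):
--             if k == key:
--                 return v
--         return dflt
--
--     out = {k: latest(k, v) for k, v in mod_dict.items()}
--     if 'modality' in out and not out['modality']:
--         out['modality'] = fname_pieces[-1]
--     return out
-- ===== Notes on version B (the rewrite author's own statement) =====
-- stated objective: alternative
-- what changed: B never updates the dict while scanning the filename: it collects the list of split key-value pairs, defines the final value of a key as the last matching pair found by scanning that list in reverse, and builds the result in one map over the dict's items; A instead folds over filename pieces mutating the dict with an inline membership test.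
import Mathlib
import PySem

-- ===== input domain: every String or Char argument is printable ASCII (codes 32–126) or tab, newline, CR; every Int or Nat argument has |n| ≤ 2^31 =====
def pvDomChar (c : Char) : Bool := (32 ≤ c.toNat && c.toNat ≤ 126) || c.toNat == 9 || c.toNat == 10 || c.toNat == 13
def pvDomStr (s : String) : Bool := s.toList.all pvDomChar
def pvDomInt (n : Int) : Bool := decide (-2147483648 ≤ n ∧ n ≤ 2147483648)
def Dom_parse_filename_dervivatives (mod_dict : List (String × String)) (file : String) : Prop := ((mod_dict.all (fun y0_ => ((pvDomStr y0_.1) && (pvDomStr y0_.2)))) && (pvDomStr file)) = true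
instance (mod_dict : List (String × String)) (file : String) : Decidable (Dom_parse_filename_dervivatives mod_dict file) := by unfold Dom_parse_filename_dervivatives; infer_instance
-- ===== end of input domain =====

-- B replaces A's dict-mutating scan of the filename with: collect the split pairs, look the
-- final value of each key up by a reverse scan, and build the result as one map over the
-- dict's items (alternative decomposition, same cost class).  A mutates mod_dict in place
-- in Python while B returns a fresh dict; the equivalence proved here is about the return value.

-- s.split(sep) for a NONEMPTY literal sep: PySem.Str.split? is some there, so getD is exact
def pvSplit (s sep : String) : List String := (PySem.Str.split? s sep).getD []

-- ===== PORT A =====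
def parse_filename_dervivatives (mod_dict : List (String × String)) (file : String) : List (String × String) :=
  let fname_pieces := pvSplit file "_"
  let d := fname_pieces.foldl (fun d word =>
      let w := pvSplit word "-"
      if w.length == 2 && d.contains (PySem.List.pyGetD w 0 "") then
        d.insert (PySem.List.pyGetD w 0 "") (PySem.List.pyGetD w 1 "")
      else d)
    (PySem.Dict.mk mod_dict)
  let d := if d.contains "modality" && (d.getD "modality" "" == "") then
      d.insert "modality" (PySem.List.pyGetD fname_pieces (-1) "")
    else d
  d.items

-- ===== PORT B =====
def parse_filename_dervivatives_alt (mod_dict : List (String × String)) (file : String) : List (String × String) :=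
  let fname_pieces := pvSplit file "_"
  let pairs := fname_pieces.filterMap (fun word =>
      let p := pvSplit word "-"
      if p.length == 2 then some (PySem.List.pyGetD p 0 "", PySem.List.pyGetD p 1 "") else none)
  let latest := fun (key dflt : String) =>
      match pairs.reverse.find? (fun kv => kv.1 == key) with
      | some kv => kv.2
      | none => dflt
  let out := PySem.Dict.mk (mod_dict.map (fun kv => (kv.1, latest kv.1 kv.2)))
  let out := if out.contains "modality" && (out.getD "modality" "" == "") then
      out.insert "modality" (PySem.List.pyGetD fname_pieces (-1) "")
    else out
  out.items

-- ===== PRECONDITION & SPEC =====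
def Spec_parse_filename_dervivatives (mod_dict : List (String × String)) (file : String) (out : List (String × String)) : Prop := out = parse_filename_dervivatives_alt mod_dict file
instance (mod_dict : List (String × String)) (file : String) (out : List (String × String)) : Decidable (Spec_parse_filename_dervivatives mod_dict file out) := by unfold Spec_parse_filename_dervivatives; infer_instance

-- ===== CLAIM (what is proved, stated in full; the proofs are below) =====
def Claim_equal_parse_filename_dervivatives : Prop := ∀ (mod_dict : List (String × String)) (file : String), Dom_parse_filename_dervivatives mod_dict file → Spec_parse_filename_dervivatives mod_dict file (parse_filename_dervivatives mod_dict file)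

-- ===== LEMMAS AND PROOFS =====

-- A's word loop, the table-building loop used only in the proof, and B's pair list, named
def pvStepA (d : PySem.Dict String String) (word : String) : PySem.Dict String String :=
  let w := pvSplit word "-"
  if w.length == 2 && d.contains (PySem.List.pyGetD w 0 "") then
    d.insert (PySem.List.pyGetD w 0 "") (PySem.List.pyGetD w 1 "")
  else d

def pvStepP (pd : PySem.Dict String String) (word : String) : PySem.Dict String String :=
  let p := pvSplit word "-"
  if p.length == 2 then pd.insert (PySem.List.pyGetD p 0 "") (PySem.List.pyGetD p 1 "")
  else pd

def pvPairs (words : List String) : List (String × String) :=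
  words.filterMap (fun word =>
    let p := pvSplit word "-"
    if p.length == 2 then some (PySem.List.pyGetD p 0 "", PySem.List.pyGetD p 1 "") else none)

-- A's word loop never changes the key set
theorem pvKeysA (words : List String) (d : PySem.Dict String String) :
    (words.foldl pvStepA d).keys = d.keys := by
  induction words generalizing d with
  | nil => rfl
  | cons w ws ih =>
    simp only [List.foldl_cons]
    rw [ih]
    unfold pvStepA
    by_cases h : ((pvSplit w "-").length == 2
        && d.contains (PySem.List.pyGetD (pvSplit w "-") 0 "")) = true
    · rw [if_pos h]
      exact PySem.Dict.keys_insert_of_contains _ _ (Bool.and_eq_true_iff.mp h).2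
    · rw [if_neg h]

-- Pointwise effect of one insert on the "bulk update" map (A side)
theorem pvPointA (pd : PySem.Dict String String) (k v : String) (p : String × String) :
    (if ((if pd.contains p.1 then (p.1, pd.getD p.1 "") else p).1 == k) then (k, v)
     else (if pd.contains p.1 then (p.1, pd.getD p.1 "") else p))
      = if (pd.insert k v).contains p.1 then (p.1, (pd.insert k v).getD p.1 "") else p := by
  obtain ⟨a, b⟩ := p
  by_cases hpc : pd.contains a = true
  · by_cases hak : a = k
    · subst hak
      simp [hpc, PySem.Dict.contains_insert_self, PySem.Dict.getD_insert_self]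
    · simp [hpc, hak, PySem.Dict.contains_insert, PySem.Dict.getD_insert]
  · by_cases hak : a = k
    · subst hak
      simp [hpc, PySem.Dict.contains_insert_self, PySem.Dict.getD_insert_self]
    · simp [hpc, hak, PySem.Dict.contains_insert]

-- The bulk-update map ignores an insert whose key is not the entry's key
theorem pvPointA' (pd : PySem.Dict String String) (k v : String) (p : String × String)
    (hpk : p.1 ≠ k) :
    (if pd.contains p.1 then (p.1, pd.getD p.1 "") else p)
      = if (pd.insert k v).contains p.1 then (p.1, (pd.insert k v).getD p.1 "") else p := by
  have h1 : (pd.insert k v).contains p.1 = pd.contains p.1 := by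
    rw [PySem.Dict.contains_insert]; simp [hpk]
  have h2 : (pd.insert k v).getD p.1 "" = pd.getD p.1 "" := by
    rw [PySem.Dict.getD_insert]; simp [hpk]
  rw [h1, h2]

-- Items after A's word loop: every entry whose key occurs in the parsed table gets its table value
theorem pvItemsA (words : List String) (d : PySem.Dict String String) :
    (words.foldl pvStepA d).items
      = d.items.map (fun p =>
          if (words.foldl pvStepP PySem.Dict.empty).contains p.1 then
            (p.1, (words.foldl pvStepP PySem.Dict.empty).getD p.1 "")
          else p) := by
  induction words using List.reverseRecOn with
  | nil =>
    simp [PySem.Dict.contains_empty]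
  | append_singleton ws w ih =>
    rw [List.foldl_append, List.foldl_append]
    simp only [List.foldl_cons, List.foldl_nil]
    set pd := ws.foldl pvStepP PySem.Dict.empty with hpd
    set dd := ws.foldl pvStepA d with hdd
    unfold pvStepA pvStepP
    by_cases hl : ((pvSplit w "-").length == 2) = true
    · rw [if_pos hl]
      by_cases hc : d.contains (PySem.List.pyGetD (pvSplit w "-") 0 "") = true
      · have hcd : dd.contains (PySem.List.pyGetD (pvSplit w "-") 0 "") = true := by
          rw [PySem.Dict.contains_iff_mem_keys] at hc ⊢
          rw [hdd, pvKeysA]; exact hc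
        rw [if_pos (by rw [hl, hcd]; rfl)]
        rw [PySem.Dict.items_insert_of_contains _ _ hcd, ih, List.map_map]
        apply List.map_congr_left
        intro p _
        exact pvPointA pd _ _ p
      · have hcd : dd.contains (PySem.List.pyGetD (pvSplit w "-") 0 "") = false := by
          rw [Bool.eq_false_iff]
          intro hx
          rw [PySem.Dict.contains_iff_mem_keys] at hx
          rw [hdd, pvKeysA] at hx
          rw [PySem.Dict.contains_iff_mem_keys] at hc
          exact hc hx
        rw [if_neg (by rw [hl, hcd]; simp)]
        rw [ih]
        apply List.map_congr_left
        intro p hp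
        have hpk : p.1 ≠ PySem.List.pyGetD (pvSplit w "-") 0 "" := by
          intro hx
          rw [PySem.Dict.contains_iff_mem_keys] at hc
          exact hc (hx ▸ PySem.Dict.mem_keys_of_mem_items _ hp)
        exact pvPointA' pd _ _ p hpk
    · rw [if_neg (fun hx => hl (Bool.and_eq_true_iff.mp hx).1), if_neg hl]
      exact ih

-- The table dict's lookup is the last matching pair, i.e. the first match in the reversed pair list
theorem pvGetP (words : List String) (d : PySem.Dict String String) (k : String) :
    (words.foldl pvStepP d).get? k
      = match (pvPairs words).reverse.find? (fun kv => kv.1 == k) with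
        | some kv => some kv.2
        | none => d.get? k := by
  induction words generalizing d with
  | nil => simp [pvPairs]
  | cons w ws ih =>
    simp only [List.foldl_cons]
    rw [ih]
    by_cases hl : ((pvSplit w "-").length == 2) = true
    · have hl' : (pvSplit w "-").length = 2 := by simpa using hl
      have hpp : pvPairs (w :: ws)
          = (PySem.List.pyGetD (pvSplit w "-") 0 "", PySem.List.pyGetD (pvSplit w "-") 1 "")
              :: pvPairs ws := by
        simp [pvPairs, hl']
      rw [hpp, List.reverse_cons, List.find?_append]
      cases hf : (pvPairs ws).reverse.find? (fun kv => kv.1 == k) with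
      | some kv => simp
      | none =>
        by_cases hk : PySem.List.pyGetD (pvSplit w "-") 0 "" = k
        · simp [pvStepP, hl, hk, List.find?, PySem.Dict.get?_insert_self]
        · have hb : (PySem.List.pyGetD (pvSplit w "-") 0 "" == k) = false := by
            simpa using hk
          simp [pvStepP, hl, hb, List.find?,
            PySem.Dict.get?_insert_of_ne _ _ (fun h => hk h.symm)]
    · have hl' : ¬ (pvSplit w "-").length = 2 := by simpa using hl
      have hpp : pvPairs (w :: ws) = pvPairs ws := by
        simp [pvPairs, hl']
      have hst : pvStepP d w = d := by unfold pvStepP; rw [if_neg hl]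
      rw [hpp, hst]

-- ===== VERDICT (by name: the statement is the Claim_ definition above) =====
theorem parse_filename_dervivatives_spec : Claim_equal_parse_filename_dervivatives := by
  unfold Claim_equal_parse_filename_dervivatives Spec_parse_filename_dervivatives
  intro mod_dict file _
  unfold parse_filename_dervivatives parse_filename_dervivatives_alt
  simp only []
  set pieces := pvSplit file "_"
  have hA : pieces.foldl (fun d word =>
      let w := pvSplit word "-"
      if w.length == 2 && d.contains (PySem.List.pyGetD w 0 "") then
        d.insert (PySem.List.pyGetD w 0 "") (PySem.List.pyGetD w 1 "")
      else d) (PySem.Dict.mk mod_dict)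
      = pieces.foldl pvStepA (PySem.Dict.mk mod_dict) := rfl
  have hP : pieces.filterMap (fun word =>
      let p := pvSplit word "-"
      if p.length == 2 then some (PySem.List.pyGetD p 0 "", PySem.List.pyGetD p 1 "") else none)
      = pvPairs pieces := rfl
  rw [hA, hP]
  have hdicts : pieces.foldl pvStepA (PySem.Dict.mk mod_dict)
      = PySem.Dict.mk (mod_dict.map (fun kv =>
          (kv.1, match (pvPairs pieces).reverse.find? (fun p => p.1 == kv.1) with
                 | some p => p.2
                 | none => kv.2))) := by
    apply PySem.Dict.ext
    rw [pvItemsA]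
    show mod_dict.map _ = mod_dict.map _
    apply List.map_congr_left
    intro p _
    have hg := pvGetP pieces PySem.Dict.empty p.1
    cases hf : (pvPairs pieces).reverse.find? (fun kv => kv.1 == p.1) with
    | some kv =>
      simp only [hf] at hg
      have hc : (pieces.foldl pvStepP PySem.Dict.empty).contains p.1 = true := by
        rw [PySem.Dict.contains_eq_isSome_get?, hg]; rfl
      have hgd : (pieces.foldl pvStepP PySem.Dict.empty).getD p.1 "" = kv.2 := by
        rw [PySem.Dict.getD_eq_get?_getD, hg]; rfl
      simp [hc, hgd]
    | none =>
      simp only [hf, PySem.Dict.get?_empty] at hg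
      have hc : (pieces.foldl pvStepP PySem.Dict.empty).contains p.1 = false := by
        rw [PySem.Dict.contains_eq_isSome_get?, hg]; rfl
      simp [hc]
  rw [hdicts]
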